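-- pv_equiv track=rewrite | github.com/MaxNoe/adventofcode2017 | adventofcode2017/day17.py | build_ring_buffer
-- ===== SOURCE A (Python) =====
-- def build_ring_buffer(size, steps):
--     pos = 0
--     buf = [0]
--     for i in range(1, size):
--         pos = (pos + steps) % len(buf)
--         buf.insert(pos + 1, i)
--         pos = (pos + 1)
--     return buf
-- ===== SOURCE B (Python) =====
-- # Same spinlock simulation, but the ring buffer is an implicit treap (a tree
-- # indexed by position), so each positional insertion is split/merge near the
-- # expected-logarithmic depth instead of list.insert's O(n) element shift.
--
-- def _size(t):
--     return t[2] if t is not None else 0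
--
--
-- def _mk(val, prio, left, right):
--     return (val, prio, _size(left) + _size(right) + 1, left, right)
--
--
-- def _prio(i):
--     # deterministic well-mixed priority (Fibonacci hashing)
--     return (i * 2654435761) % 4294967296
--
--
-- def _merge(a, b):
--     # all elements of a precede all elements of b
--     if a is None:
--         return b
--     if b is None:
--         return a
--     if a[1] >= b[1]:
--         return _mk(a[0], a[1], a[3], _merge(a[4], b))
--     return _mk(b[0], b[1], _merge(a, b[3]), b[4])
--
--
-- def _split(t, k):
--     # (tree of the first k elements, tree of the rest)
--     if t is None:
--         return (None, None)
--     if k <= _size(t[3]):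
--         l, r = _split(t[3], k)
--         return (l, _mk(t[0], t[1], r, t[4]))
--     l, r = _split(t[4], k - _size(t[3]) - 1)
--     return (_mk(t[0], t[1], t[3], l), r)
--
--
-- def _flatten(t, acc):
--     # in-order traversal appended onto acc
--     if t is None:
--         return acc
--     _flatten(t[3], acc)
--     acc.append(t[0])
--     return _flatten(t[4], acc)
--
--
-- def build_ring_buffer(size, steps):
--     pos = 0
--     root = _mk(0, _prio(0), None, None)
--     for i in range(1, size):
--         pos = (pos + steps) % _size(root)
--         l, r = _split(root, pos + 1)
--         root = _merge(_merge(l, _mk(i, _prio(i), None, None)), r)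
--         pos = pos + 1
--     return _flatten(root, [])
-- ===== Notes on version B (the rewrite author's own statement) =====
-- stated objective: alternative
-- what changed: The ring buffer is kept as an implicit treap (position-indexed balanced tree) with split/merge insertion and a final in-order flatten, instead of a Python list with O(n) positional inserts.
import Mathlib
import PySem

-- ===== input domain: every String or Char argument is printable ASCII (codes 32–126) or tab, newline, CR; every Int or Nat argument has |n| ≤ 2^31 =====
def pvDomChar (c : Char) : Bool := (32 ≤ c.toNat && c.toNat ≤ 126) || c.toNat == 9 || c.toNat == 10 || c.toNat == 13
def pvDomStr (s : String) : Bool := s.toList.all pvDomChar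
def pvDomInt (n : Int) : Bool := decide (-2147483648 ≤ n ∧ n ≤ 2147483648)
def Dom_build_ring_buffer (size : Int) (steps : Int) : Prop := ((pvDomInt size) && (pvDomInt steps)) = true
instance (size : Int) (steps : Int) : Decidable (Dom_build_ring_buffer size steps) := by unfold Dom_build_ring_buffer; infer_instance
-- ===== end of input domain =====

-- B replaces the Python list (O(n) positional insert) by an implicit treap with
-- split/merge insertion and a final in-order flatten; same return value, alternative algorithm.

-- ===== PORT A =====
def build_ring_buffer (size : Int) (steps : Int) : List Int :=
  let st := (PySem.List.pyRange 1 size 1).foldl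
    (fun (st : Int × List Int) i =>
      let pos := PySem.Int.mod (st.1 + steps) ((st.2.length : Int))
      (pos + 1, PySem.List.insert st.2 (pos + 1) i))
    (0, [0])
  st.2

-- ===== PORT B =====
-- node: value, priority, cached size, left, right  (Python tuple (val, prio, size, l, r))
inductive PvTreap where
  | leaf : PvTreap
  | node : Int → Int → Int → PvTreap → PvTreap → PvTreap
deriving DecidableEq, Repr

def pvSize : PvTreap → Int
  | .leaf => 0
  | .node _ _ s _ _ => s

def pvMk (v p : Int) (l r : PvTreap) : PvTreap :=
  .node v p (pvSize l + pvSize r + 1) l r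

def pvPrio (i : Int) : Int :=
  PySem.Int.mod (i * 2654435761) 4294967296

def pvCount : PvTreap → Nat
  | .leaf => 0
  | .node _ _ _ l r => pvCount l + pvCount r + 1

def pvMerge : PvTreap → PvTreap → PvTreap
  | .leaf, b => b
  | a, .leaf => a
  | .node v p s l r, .node v' p' s' l' r' =>
    if p' ≤ p then pvMk v p l (pvMerge r (.node v' p' s' l' r'))
    else pvMk v' p' (pvMerge (.node v p s l r) l') r'
termination_by a b => pvCount a + pvCount b
decreasing_by all_goals (simp [pvCount]; try omega)

def pvSplit : PvTreap → Int → PvTreap × PvTreap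
  | .leaf, _ => (.leaf, .leaf)
  | .node v p _ l r, k =>
    if k ≤ pvSize l then
      let lr := pvSplit l k
      (lr.1, pvMk v p lr.2 r)
    else
      let lr := pvSplit r (k - pvSize l - 1)
      (pvMk v p l lr.1, lr.2)

def pvFlatten : PvTreap → List Int → List Int
  | .leaf, acc => acc
  | .node v _ _ l r, acc => pvFlatten r (pvFlatten l acc ++ [v])

def build_ring_buffer_alt (size : Int) (steps : Int) : List Int :=
  let st := (PySem.List.pyRange 1 size 1).foldl
    (fun (st : Int × PvTreap) i =>
      let pos := PySem.Int.mod (st.1 + steps) (pvSize st.2)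
      let lr := pvSplit st.2 (pos + 1)
      (pos + 1, pvMerge (pvMerge lr.1 (pvMk i (pvPrio i) .leaf .leaf)) lr.2))
    (0, pvMk 0 (pvPrio 0) .leaf .leaf)
  pvFlatten st.2 []

-- ===== PRECONDITION & SPEC =====
def Spec_build_ring_buffer (size : Int) (steps : Int) (out : List Int) : Prop := out = build_ring_buffer_alt size steps
instance (size : Int) (steps : Int) (out : List Int) : Decidable (Spec_build_ring_buffer size steps out) := by unfold Spec_build_ring_buffer; infer_instance

-- ===== CLAIM (what is proved, stated in full; the proofs are below) =====
def Claim_equal_build_ring_buffer : Prop := ∀ (size : Int) (steps : Int), Dom_build_ring_buffer size steps → Spec_build_ring_buffer size steps (build_ring_buffer size steps)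

-- ===== LEMMAS AND PROOFS =====

-- in-order contents of a treap
def pvToList : PvTreap → List Int
  | .leaf => []
  | .node v _ _ l r => pvToList l ++ v :: pvToList r

-- cached sizes are correct
inductive PvWF : PvTreap → Prop
  | leaf : PvWF .leaf
  | node (v p : Int) {l r : PvTreap} : PvWF l → PvWF r →
      PvWF (.node v p (pvSize l + pvSize r + 1) l r)

lemma pvSize_eq_length {t : PvTreap} (h : PvWF t) :
    pvSize t = ((pvToList t).length : Int) := by
  induction h with
  | leaf => simp [pvSize, pvToList]
  | @node v p l r hl hr ihl ihr =>
    have hs : pvSize (PvTreap.node v p (pvSize l + pvSize r + 1) l r)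
        = pvSize l + pvSize r + 1 := rfl
    rw [hs, ihl, ihr]
    simp [pvToList]
    omega

lemma pvWF_mk (v p : Int) {l r : PvTreap} (hl : PvWF l) (hr : PvWF r) :
    PvWF (pvMk v p l r) := PvWF.node v p hl hr

lemma pvToList_mk (v p : Int) (l r : PvTreap) :
    pvToList (pvMk v p l r) = pvToList l ++ v :: pvToList r := rfl

lemma pvMerge_ok {a b : PvTreap} (ha : PvWF a) (hb : PvWF b) :
    PvWF (pvMerge a b) ∧ pvToList (pvMerge a b) = pvToList a ++ pvToList b := by
  induction a, b using pvMerge.induct with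
  | case1 b => simpa [pvMerge, pvToList] using hb
  | case2 a h => cases a with
    | leaf => simp at h
    | node v p s l r => simpa [pvMerge, pvToList] using ha
  | case3 v p s l r v' p' s' l' r' hle ih =>
    cases ha with | node _ _ hl hr =>
    obtain ⟨hw, ht⟩ := ih hr hb
    rw [pvMerge]
    simp only [if_pos hle]
    exact ⟨pvWF_mk _ _ hl hw, by simp [pvToList_mk, ht, pvToList]⟩
  | case4 v p s l r v' p' s' l' r' hle ih =>
    cases hb with | node _ _ hl' hr' =>
    obtain ⟨hw, ht⟩ := ih ha hl'
    rw [pvMerge]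
    simp only [if_neg hle]
    exact ⟨pvWF_mk _ _ hw hr', by simp [pvToList_mk, ht, pvToList]⟩

lemma pvSplit_ok {t : PvTreap} (h : PvWF t) (k : Int) (hk0 : 0 ≤ k)
    (hk : k ≤ pvSize t) :
    PvWF (pvSplit t k).1 ∧ PvWF (pvSplit t k).2 ∧
    pvToList (pvSplit t k).1 = (pvToList t).take k.toNat ∧
    pvToList (pvSplit t k).2 = (pvToList t).drop k.toNat := by
  induction h generalizing k with
  | leaf => simp [pvSplit, pvToList, PvWF.leaf]
  | @node v p l r hl hr ihl ihr =>
    by_cases hc : k ≤ pvSize l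
    · obtain ⟨w1, w2, t1, t2⟩ := ihl k hk0 hc
      have hlen : k.toNat ≤ (pvToList l).length := by
        have := pvSize_eq_length hl; omega
      rw [pvSplit]
      simp only [if_pos hc]
      refine ⟨w1, pvWF_mk _ _ w2 hr, ?_, ?_⟩
      · simpa [pvToList, List.take_append, Nat.sub_eq_zero_of_le hlen] using t1
      · simp [pvToList_mk, pvToList, t2, List.drop_append, Nat.sub_eq_zero_of_le hlen]
    · have hszl := pvSize_eq_length hl
      have hszr := pvSize_eq_length hr
      have hsz : pvSize (PvTreap.node v p (pvSize l + pvSize r + 1) l r) =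
          pvSize l + pvSize r + 1 := rfl
      have hk' : k - pvSize l - 1 ≤ pvSize r := by rw [hsz] at hk; omega
      have hk0' : 0 ≤ k - pvSize l - 1 := by omega
      obtain ⟨w1, w2, t1, t2⟩ := ihr (k - pvSize l - 1) hk0' hk'
      rw [pvSplit]
      simp only [if_neg hc]
      have hkk : k.toNat = (pvToList l).length + ((k - pvSize l - 1).toNat + 1) := by omega
      have harith : (pvToList l).length + ((k - pvSize l - 1).toNat + 1) - (pvToList l).length
          = (k - pvSize l - 1).toNat + 1 := by omega
      refine ⟨pvWF_mk _ _ hl w1, w2, ?_, ?_⟩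
      · rw [pvToList_mk, t1, pvToList, hkk, List.take_append,
          List.take_of_length_le (Nat.le_add_right _ _), harith, List.take_succ_cons]
      · have hd : List.drop ((pvToList l).length + ((k - pvSize l - 1).toNat + 1))
            (pvToList l) = [] := List.drop_eq_nil_of_le (Nat.le_add_right _ _)
        rw [t2, pvToList, hkk, List.drop_append, hd, harith, List.drop_succ_cons,
          List.nil_append]

lemma pvFlatten_eq (t : PvTreap) (acc : List Int) :
    pvFlatten t acc = acc ++ pvToList t := by
  induction t generalizing acc with
  | leaf => simp [pvFlatten, pvToList]
  | node v p s l r ihl ihr => simp [pvFlatten, pvToList, ihl, ihr]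

-- the two loop bodies, named forms of the loop bodies for the fold lemma
def pvStepA (steps : Int) (st : Int × List Int) (i : Int) : Int × List Int :=
  let pos := PySem.Int.mod (st.1 + steps) ((st.2.length : Int))
  (pos + 1, PySem.List.insert st.2 (pos + 1) i)

def pvStepB (steps : Int) (st : Int × PvTreap) (i : Int) : Int × PvTreap :=
  let pos := PySem.Int.mod (st.1 + steps) (pvSize st.2)
  let lr := pvSplit st.2 (pos + 1)
  (pos + 1, pvMerge (pvMerge lr.1 (pvMk i (pvPrio i) .leaf .leaf)) lr.2)

def pvInv (a : Int × List Int) (b : Int × PvTreap) : Prop :=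
  a.1 = b.1 ∧ PvWF b.2 ∧ pvToList b.2 = a.2 ∧ a.2 ≠ []

lemma pvStep_inv (steps i : Int) {a : Int × List Int} {b : Int × PvTreap}
    (h : pvInv a b) : pvInv (pvStepA steps a i) (pvStepB steps b i) := by
  obtain ⟨hpos, hwf, hlist, hne⟩ := h
  have hlen : pvSize b.2 = ((a.2.length : Int)) := by
    rw [pvSize_eq_length hwf, hlist]
  have hlenpos : 0 < (a.2.length : Int) := by
    simp only [Int.natCast_pos]
    exact List.length_pos_iff.mpr hne
  set pos := PySem.Int.mod (a.1 + steps) ((a.2.length : Int)) with hposdef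
  have hmod : 0 ≤ pos ∧ pos < (a.2.length : Int) := by
    rw [hposdef, PySem.Int.mod_eq_emod_of_pos hlenpos]
    exact ⟨Int.emod_nonneg _ (by omega), Int.emod_lt_of_pos _ hlenpos⟩
  have hk0 : 0 ≤ pos + 1 := by omega
  have hkle : pos + 1 ≤ pvSize b.2 := by omega
  obtain ⟨w1, w2, t1, t2⟩ := pvSplit_ok hwf (pos + 1) hk0 hkle
  have hmidwf : PvWF (pvMk i (pvPrio i) .leaf .leaf) := pvWF_mk _ _ PvWF.leaf PvWF.leaf
  obtain ⟨m1w, m1t⟩ := pvMerge_ok w1 hmidwf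
  obtain ⟨m2w, m2t⟩ := pvMerge_ok m1w w2
  have hnat : pos + 1 = (((pos + 1).toNat : Nat) : Int) := by omega
  have hnatle : (pos + 1).toNat ≤ a.2.length := by omega
  have hins : PySem.List.insert a.2 (pos + 1) i =
      a.2.take (pos + 1).toNat ++ i :: a.2.drop (pos + 1).toNat := by
    rw [hnat]; exact PySem.List.insert_natCast a.2 (pos + 1).toNat i hnatle
  constructor
  · simp [pvStepA, pvStepB, hlen, ← hposdef, hpos.symm]
  refine ⟨?_, ?_, ?_⟩
  · simpa [pvStepB, hlen, ← hposdef, hpos.symm] using m2w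
  · simp only [pvStepB, pvStepA]
    rw [show PySem.Int.mod (b.1 + steps) (pvSize b.2) = pos by
      rw [hlen, ← hpos, hposdef]]
    rw [m2t, m1t, t1, t2, hlist, hins]
    simp [pvToList_mk, pvToList]
  · simp only [pvStepA]
    intro hcon
    exact absurd (congrArg List.length hcon) (by simp)

lemma pvFold_inv (steps : Int) (L : List Int) :
    ∀ (a : Int × List Int) (b : Int × PvTreap), pvInv a b →
      pvInv (L.foldl (pvStepA steps) a) (L.foldl (pvStepB steps) b) := by
  induction L with
  | nil => intro a b h; exact h
  | cons x xs ih =>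
    intro a b h
    exact ih _ _ (pvStep_inv steps x h)

-- ===== VERDICT (by name: the statement is the Claim_ definition above) =====
theorem build_ring_buffer_spec : Claim_equal_build_ring_buffer := by
  intro size steps _
  unfold Spec_build_ring_buffer build_ring_buffer build_ring_buffer_alt
  have h0 : pvInv (0, [0]) (0, pvMk 0 (pvPrio 0) .leaf .leaf) := by
    refine ⟨rfl, pvWF_mk _ _ PvWF.leaf PvWF.leaf, ?_, by simp⟩
    simp [pvToList_mk, pvToList]
  have eA : (fun (st : Int × List Int) i =>
      (PySem.Int.mod (st.1 + steps) ((st.2.length : Int)) + 1,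
        PySem.List.insert st.2 (PySem.Int.mod (st.1 + steps) ((st.2.length : Int)) + 1) i))
      = pvStepA steps := rfl
  have eB : (fun (st : Int × PvTreap) i =>
      (PySem.Int.mod (st.1 + steps) (pvSize st.2) + 1,
        pvMerge (pvMerge (pvSplit st.2 (PySem.Int.mod (st.1 + steps) (pvSize st.2) + 1)).1
          (pvMk i (pvPrio i) .leaf .leaf))
          (pvSplit st.2 (PySem.Int.mod (st.1 + steps) (pvSize st.2) + 1)).2))
      = pvStepB steps := rfl
  have h := pvFold_inv steps (PySem.List.pyRange 1 size 1) _ _ h0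
  obtain ⟨-, -, hlist, -⟩ := h
  simp only [eA, eB]
  rw [pvFlatten_eq, List.nil_append, hlist]
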